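-- pv_equiv track=rewrite | github.com/SuperGuy10/LeeCodePractice | Python/581. Shortest Unsorted Continuous Subarray.py | findUnsortedSubarray
-- ===== SOURCE A (Python) =====
-- def findUnsortedSubarray(nums):
--     """
--     :type nums: List[int]
--     :rtype: int
--     """
--     SL = sorted(nums)
--     l = len(nums)
--     LP = 0
--     RP = 0
--
--     for n in range(l):
--         if nums[n] != SL[n]:
--             LP = n
--             break
--     for n in range(l):
--         if nums[l-1-n] != SL[l-1-n]:
--             RP = l-n
--             break
--
--     return RP-LP
-- ===== SOURCE B (Python) =====
-- def findUnsortedSubarray(nums):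
--     """
--     :type nums: List[int]
--     :rtype: int
--     """
--     end = -1
--     max_seen = None
--     for i, x in enumerate(nums):
--         if max_seen is None or x >= max_seen:
--             max_seen = x
--         else:
--             end = i
--     if end == -1:
--         return 0
--     start = end
--     min_seen = None
--     for i in range(len(nums) - 1, -1, -1):
--         x = nums[i]
--         if min_seen is None or x <= min_seen:
--             min_seen = x
--         else:
--             start = i
--     return end - start + 1
-- ===== Notes on version B (the rewrite author's own statement) =====
-- stated objective: faster
-- what changed: Replaces A's sort-and-compare (sort the array, scan from both ends for the first/last position disagreeing with the sorted copy) by a sort-free single pass in each direction: a forward pass tracking the running maximum finds the last out-of-order index, a backward pass tracking the running minimum finds the first.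
import Mathlib
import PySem

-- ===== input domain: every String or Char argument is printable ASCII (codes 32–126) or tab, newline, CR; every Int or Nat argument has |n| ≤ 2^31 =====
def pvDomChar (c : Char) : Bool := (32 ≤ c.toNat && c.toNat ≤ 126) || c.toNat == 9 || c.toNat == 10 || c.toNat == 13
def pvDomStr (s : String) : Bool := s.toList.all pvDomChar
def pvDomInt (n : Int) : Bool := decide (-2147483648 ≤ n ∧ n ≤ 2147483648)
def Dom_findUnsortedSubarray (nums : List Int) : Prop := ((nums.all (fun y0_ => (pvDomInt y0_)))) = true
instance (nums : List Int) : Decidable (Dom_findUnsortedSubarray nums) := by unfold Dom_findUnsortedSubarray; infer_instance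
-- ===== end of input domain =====

-- B replaces A's sort-and-compare by two sort-free linear passes (running max / running min); a timing run measures the speed-up.


-- ===== PORT A =====
-- first 'for n in range(l)' loop: break at the first n with nums[n] != SL[n], LP = that n (else 0)
def pvALoop1 (nums SL : List Int) : List Int → Int
  | [] => 0
  | n :: rest =>
      if PySem.List.pyGet? nums n ≠ PySem.List.pyGet? SL n then n else pvALoop1 nums SL rest

-- second loop: break at the first n with nums[l-1-n] != SL[l-1-n], RP = l-n (else 0)
def pvALoop2 (nums SL : List Int) (l : Int) : List Int → Int
  | [] => 0
  | n :: rest =>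
      if PySem.List.pyGet? nums (l - 1 - n) ≠ PySem.List.pyGet? SL (l - 1 - n) then l - n
      else pvALoop2 nums SL l rest

def findUnsortedSubarray (nums : List Int) : Int :=
  let SL := PySem.List.sorted nums (fun x => x) false
  let l : Int := nums.length
  let LP := pvALoop1 nums SL (PySem.List.pyRange 0 l 1)
  let RP := pvALoop2 nums SL l (PySem.List.pyRange 0 l 1)
  RP - LP

-- ===== PORT B =====
-- forward pass: state (end, max_seen)
def pvBStep1 (st : Int × Option Int) (p : Int × Int) : Int × Option Int :=
  match st.2 with
  | none => (st.1, some p.2)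
  | some m => if m ≤ p.2 then (st.1, some p.2) else (p.1, st.2)

-- backward pass: state (start, min_seen), i the current index
def pvBStep2 (nums : List Int) (st : Int × Option Int) (i : Int) : Int × Option Int :=
  let x := PySem.List.pyGetD nums i 0
  match st.2 with
  | none => (st.1, some x)
  | some m => if x ≤ m then (st.1, some x) else (i, st.2)

def findUnsortedSubarray_alt (nums : List Int) : Int :=
  let st1 := (PySem.List.enumerate nums).foldl pvBStep1 (-1, none)
  let endI := st1.1
  if endI = -1 then 0
  else
    let st2 := (PySem.List.pyRange ((nums.length : Int) - 1) (-1) (-1)).foldl (pvBStep2 nums) (endI, none)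
    endI - st2.1 + 1

-- ===== PRECONDITION & SPEC =====
def Spec_findUnsortedSubarray (nums : List Int) (out : Int) : Prop := out = findUnsortedSubarray_alt nums
instance (nums : List Int) (out : Int) : Decidable (Spec_findUnsortedSubarray nums out) := by unfold Spec_findUnsortedSubarray; infer_instance

-- ===== CLAIM (what is proved, stated in full; the proofs are below) =====
def Claim_equal_findUnsortedSubarray : Prop := ∀ (nums : List Int), Dom_findUnsortedSubarray nums → Spec_findUnsortedSubarray nums (findUnsortedSubarray nums)

-- ===== LEMMAS AND PROOFS =====

-- mismatch / descent / ascent index predicates (proof-side only)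
def misB (v S : List Int) (i : Nat) : Bool := decide (v.getD i 0 ≠ S.getD i 0)
def descB (v : List Int) (i : Nat) : Bool := decide (∃ j < i, v.getD i 0 < v.getD j 0)
def ascB (v : List Int) (i : Nat) : Bool :=
  decide (∃ j < v.length, i < j ∧ v.getD j 0 < v.getD i 0)
def Ml (v S : List Int) : List Nat := (List.range v.length).filter (misB v S)
def Dl (v : List Int) : List Nat := (List.range v.length).filter (descB v)
def Al (v : List Int) : List Nat := (List.range v.length).filter (ascB v)

lemma filterRange_pairwise (p : Nat → Bool) (n : Nat) :
    ((List.range n).filter p).Pairwise (· < ·) :=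
  (List.pairwise_lt_range).filter p

lemma mem_Ml {v S : List Int} {i : Nat} : i ∈ Ml v S ↔ i < v.length ∧ misB v S i = true := by
  simp [Ml, List.mem_filter]
lemma mem_Dl {v : List Int} {i : Nat} : i ∈ Dl v ↔ i < v.length ∧ descB v i = true := by
  simp [Dl, List.mem_filter]
lemma mem_Al {v : List Int} {i : Nat} : i ∈ Al v ↔ i < v.length ∧ ascB v i = true := by
  simp [Al, List.mem_filter]

lemma head?_is_min {l : List Nat} (h : l.Pairwise (· < ·)) {a : Nat}
    (ha : l.head? = some a) : a ∈ l ∧ ∀ c ∈ l, a ≤ c := by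
  cases l with
  | nil => simp at ha
  | cons x t =>
    simp at ha; subst ha
    refine ⟨List.mem_cons_self, ?_⟩
    intro c hc
    rcases List.mem_cons.mp hc with rfl | hc
    · exact le_refl _
    · exact le_of_lt ((List.pairwise_cons.mp h).1 c hc)

lemma getLast?_is_max {l : List Nat} (h : l.Pairwise (· < ·)) {b : Nat}
    (hb : l.getLast? = some b) : b ∈ l ∧ ∀ c ∈ l, c ≤ b := by
  have h' : l.reverse.Pairwise (· > ·) := by
    rw [List.pairwise_reverse]; exact h
  have hb' : l.reverse.head? = some b := by rw [List.head?_reverse]; exact hb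
  cases hl : l.reverse with
  | nil => rw [hl] at hb'; simp at hb'
  | cons x t =>
    rw [hl] at hb' h'; simp at hb'; subst hb'
    constructor
    · have hbm : x ∈ l.reverse := by rw [hl]; exact List.mem_cons_self
      simpa using hbm
    · intro c hc
      have : c ∈ l.reverse := by simpa using hc
      rw [hl] at this
      rcases List.mem_cons.mp this with rfl | hc'
      · exact le_refl _
      · exact le_of_lt ((List.pairwise_cons.mp h').1 c hc')

lemma pvALoop1_eq_find? (v S : List Int) (L : List Int) :
    pvALoop1 v S L =
      (L.find? (fun i => decide (PySem.List.pyGet? v i ≠ PySem.List.pyGet? S i))).getD 0 := by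
  induction L with
  | nil => rfl
  | cons n rest ih =>
    rw [pvALoop1, List.find?_cons]
    by_cases h : PySem.List.pyGet? v n ≠ PySem.List.pyGet? S n
    · simp [h]
    · simp [h, ih]

lemma pvALoop2_eq_find? (v S : List Int) (l : Int) (L : List Int) :
    pvALoop2 v S l L =
      (match L.find? (fun i => decide (PySem.List.pyGet? v (l - 1 - i) ≠ PySem.List.pyGet? S (l - 1 - i))) with
       | some i => l - i
       | none => 0) := by
  induction L with
  | nil => rfl
  | cons n rest ih =>
    rw [pvALoop2, List.find?_cons]
    by_cases h : PySem.List.pyGet? v (l - 1 - n) ≠ PySem.List.pyGet? S (l - 1 - n)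
    · simp [h]
    · simp [h, ih]

lemma A_LP (v S : List Int) (hlen : S.length = v.length) :
    pvALoop1 v S (PySem.List.pyRange 0 v.length 1) =
      (match (Ml v S).head? with | some a => (a : Int) | none => 0) := by
  rw [pvALoop1_eq_find?, PySem.List.pyRange_one]
  simp only [sub_zero, Int.toNat_natCast, zero_add]
  rw [List.find?_map]
  have hc : ∀ i ∈ List.range v.length,
      ((fun i => decide (PySem.List.pyGet? v i ≠ PySem.List.pyGet? S i)) ∘ (fun k : Nat => (k : Int))) i
        = misB v S i := by
    intro i hi
    have hiv : i < v.length := List.mem_range.mp hi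
    have hiS : i < S.length := by omega
    simp [Function.comp, PySem.List.pyGet?_natCast, misB,
      List.getElem?_eq_getElem hiv, List.getElem?_eq_getElem hiS]
  rw [← List.head?_filter, List.filter_congr hc, ← Ml]
  cases h : (Ml v S).head? with
  | none => simp
  | some a => simp


lemma A_RP (v S : List Int) (hlen : S.length = v.length) :
    pvALoop2 v S v.length (PySem.List.pyRange 0 v.length 1) =
      (match (Ml v S).getLast? with | some b => (b : Int) + 1 | none => 0) := by
  rw [pvALoop2_eq_find?, PySem.List.pyRange_one]
  simp only [sub_zero, Int.toNat_natCast, zero_add]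
  rw [List.find?_map, ← List.head?_filter]
  have hc : ∀ k ∈ List.range v.length,
      ((fun i => decide (PySem.List.pyGet? v ((v.length : Int) - 1 - i) ≠
          PySem.List.pyGet? S ((v.length : Int) - 1 - i))) ∘ (fun k : Nat => (k : Int))) k
        = misB v S (v.length - 1 - k) := by
    intro k hk
    have hkv : k < v.length := List.mem_range.mp hk
    have hidx : (v.length : Int) - 1 - k = ((v.length - 1 - k : Nat) : Int) := by omega
    have h1 : v.length - 1 - k < v.length := by omega
    have h2 : v.length - 1 - k < S.length := by omega
    simp [Function.comp, hidx, PySem.List.pyGet?_natCast, misB,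
      List.getElem?_eq_getElem h1, List.getElem?_eq_getElem h2]
  rw [List.filter_congr hc]
  have hmap : (List.range v.length).map (fun k => v.length - 1 - k) = (List.range v.length).reverse := by
    rw [List.range_eq_range', List.reverse_range', ← List.range_eq_range']
    simp
  have hrev : ((List.range v.length).filter (fun k => misB v S (v.length - 1 - k))).map
      (fun k => v.length - 1 - k) = (Ml v S).reverse := by
    have h2 := List.filter_map (f := fun k : Nat => v.length - 1 - k) (p := misB v S)
      (l := List.range v.length)
    rw [hmap, List.filter_reverse] at h2
    simpa [Function.comp, Ml] using h2.symm
  have hhead : (((List.range v.length).filter (fun k => misB v S (v.length - 1 - k))).head?).map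
      (fun k => v.length - 1 - k) = (Ml v S).getLast? := by
    rw [← List.head?_map, hrev, List.head?_reverse]
  cases hF : ((List.range v.length).filter (fun k => misB v S (v.length - 1 - k))).head? with
  | none =>
    rw [hF] at hhead; simp at hhead; rw [← hhead]; simp
  | some k =>
    rw [hF] at hhead; simp at hhead
    rw [← hhead]
    have hkmem := List.mem_of_mem_head? hF
    have hkn : k < v.length := List.mem_range.mp (List.mem_of_mem_filter hkmem)
    have hgoal : ((v.length - 1 - k : Nat) : Int) + 1 = (v.length : Int) - (k : Int) := by omega
    simp [hgoal]

lemma enumerate_append_singleton (xs : List Int) (x : Int) (s : Int) :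
    PySem.List.enumerate (xs ++ [x]) s =
      PySem.List.enumerate xs s ++ [(s + xs.length, x)] := by
  induction xs generalizing s with
  | nil => simp [PySem.List.enumerate_nil, PySem.List.enumerate_cons]
  | cons y ys ih =>
    simp only [List.cons_append, PySem.List.enumerate_cons, ih, List.length_cons]
    have : s + 1 + (ys.length : Int) = s + ((ys.length + 1 : Nat) : Int) := by push_cast; ring
    rw [this]

lemma max?_bound {l : List Int} {m : Int} (h : l.max? = some m) : m ∈ l ∧ ∀ y ∈ l, y ≤ m :=
  List.max?_eq_some_iff.mp h

lemma descB_append_lt (xs : List Int) (x : Int) (i : Nat) (hi : i < xs.length) :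
    descB (xs ++ [x]) i = descB xs i := by
  unfold descB
  congr 1
  apply propext
  constructor
  · rintro ⟨j, hj, hlt⟩
    exact ⟨j, hj, by rwa [List.getD_append _ _ _ _ hi, List.getD_append _ _ _ _ (by omega)] at hlt⟩
  · rintro ⟨j, hj, hlt⟩
    exact ⟨j, hj, by rwa [List.getD_append _ _ _ _ hi, List.getD_append _ _ _ _ (by omega)]⟩

lemma Dl_append (xs : List Int) (x : Int) :
    Dl (xs ++ [x]) = Dl xs ++ (if descB (xs ++ [x]) xs.length then [xs.length] else []) := by
  unfold Dl
  rw [List.length_append, List.length_singleton, List.range_succ, List.filter_append]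
  congr 1
  · apply List.filter_congr
    intro i hi
    exact descB_append_lt xs x i (List.mem_range.mp hi)
  · simp only [List.filter]
    cases h : descB (xs ++ [x]) xs.length with
    | false => simp
    | true => simp

lemma B_fold1 (v : List Int) :
    (PySem.List.enumerate v).foldl pvBStep1 (-1, none) =
      ((match (Dl v).getLast? with | some b => (b : Int) | none => -1), v.max?) := by
  induction v using List.reverseRecOn with
  | nil => simp [PySem.List.enumerate_nil, Dl]
  | append_singleton xs x ih =>
    rw [enumerate_append_singleton, List.foldl_append, ih]
    simp only [List.foldl_cons, List.foldl_nil]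
    cases hmax : xs.max? with
    | none =>
      have hnil : xs = [] := List.max?_eq_none_iff.mp hmax
      subst hnil
      simp [pvBStep1, Dl, descB, List.filter]
    | some m =>
      obtain ⟨hmem, hbd⟩ := max?_bound hmax
      have hgetD : (xs ++ [x]).getD xs.length 0 = x := by
        rw [List.getD_append_right _ _ _ _ (le_refl _)]
        simp
      by_cases hle : m ≤ x
      · -- no new descent; max becomes x
        have hdesc : descB (xs ++ [x]) xs.length = false := by
          unfold descB
          simp only [decide_eq_false_iff_not]
          rintro ⟨j, hj, hlt⟩
          rw [hgetD, List.getD_append _ _ _ _ hj] at hlt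
          have : xs.getD j 0 ∈ xs := by rw [List.getD_eq_getElem _ _ hj]; exact List.getElem_mem hj
          exact absurd (le_trans (hbd _ this) hle) (not_le.mpr hlt)
        have hmax' : (xs ++ [x]).max? = some x := by
          rw [List.max?_eq_some_iff]
          refine ⟨by simp, ?_⟩
          intro b hb
          rcases List.mem_append.mp hb with hb | hb
          · exact le_trans (hbd _ hb) hle
          · simp at hb; exact le_of_eq hb
        rw [Dl_append, hdesc, hmax']
        simp [pvBStep1, hle]
      · -- new descent at xs.length; max stays m
        push Not at hle
        have hdesc : descB (xs ++ [x]) xs.length = true := by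
          unfold descB
          simp only [decide_eq_true_eq]
          obtain ⟨j, hj, hxj⟩ := List.mem_iff_getElem.mp hmem
          refine ⟨j, hj, ?_⟩
          rw [hgetD, List.getD_append _ _ _ _ hj, List.getD_eq_getElem _ _ hj, hxj]
          exact hle
        have hmax' : (xs ++ [x]).max? = some m := by
          rw [List.max?_eq_some_iff]
          refine ⟨by simp [hmem], ?_⟩
          intro b hb
          rcases List.mem_append.mp hb with hb | hb
          · exact hbd _ hb
          · simp at hb; subst hb; exact le_of_lt hle
        rw [Dl_append, hdesc, hmax']
        simp [pvBStep1, not_le.mpr hle]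

lemma min?_bound {l : List Int} {m : Int} (h : l.min? = some m) : m ∈ l ∧ ∀ y ∈ l, m ≤ y :=
  List.min?_eq_some_iff.mp h

lemma B_fold2 (v : List Int) : ∀ (k : Nat), k ≤ v.length → ∀ (e : Int),
    (PySem.List.pyRange ((k : Int) - 1) (-1) (-1)).foldl (pvBStep2 v) (e, (v.drop k).min?) =
      ((match ((List.range k).filter (ascB v)).head? with | some a => (a : Int) | none => e),
        v.min?) := by
  intro k
  induction k with
  | zero =>
    intro _ e
    rw [PySem.List.pyRange_neg_one_eq_nil (by omega)]
    simp
  | succ k ih =>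
    intro hk e
    have hkn : k < v.length := by omega
    have hc1 : ((k + 1 : Nat) : Int) - 1 = (k : Int) := by push_cast; ring
    rw [hc1, PySem.List.pyRange_neg_one_cons (by omega), List.foldl_cons]
    have hx : PySem.List.pyGetD v (k : Int) 0 = v[k] := by
      rw [PySem.List.pyGetD_natCast, List.getD_eq_getElem _ _ hkn]
    have hdropk : v.drop k = v[k] :: v.drop (k + 1) := List.drop_eq_getElem_cons hkn
    have hfilt : (List.range (k+1)).filter (ascB v) =
        (List.range k).filter (ascB v) ++ (if ascB v k then [k] else []) := by
      rw [List.range_succ, List.filter_append]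
      congr 1
      simp only [List.filter]
      cases h : ascB v k with
      | false => simp
      | true => simp
    cases ht : (v.drop (k+1)).min? with
    | none =>
      have hemp : v.drop (k+1) = [] := List.min?_eq_none_iff.mp ht
      have hlen : v.length ≤ k + 1 := by
        have := List.drop_eq_nil_iff.mp hemp; omega
      have hasc : ascB v k = false := by
        simp only [ascB, decide_eq_false_iff_not]
        rintro ⟨j, hj, hkj, _⟩; omega
      have hmin : (v.drop k).min? = some v[k] := by rw [hdropk, hemp]; rfl
      rw [hfilt, hasc]
      simp only [pvBStep2, hx]
      have := ih (by omega) e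
      rw [hmin] at this
      simpa using this
    | some mv =>
      obtain ⟨hmem, hbd⟩ := min?_bound ht
      have hmin : (v.drop k).min? = some (min v[k] mv) := by
        rw [hdropk, List.min?_cons, ht]; rfl
      by_cases hle : v[k] ≤ mv
      · have hasc : ascB v k = false := by
          simp only [ascB, decide_eq_false_iff_not]
          rintro ⟨j, hj, hkj, hlt⟩
          have hjd : v.getD j 0 ∈ v.drop (k+1) := by
            rw [List.getD_eq_getElem _ _ hj]
            have : v[j] = (v.drop (k+1))[j - (k+1)]'(by simp; omega) := by
              rw [List.getElem_drop]; congr 1; omega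
            rw [this]; exact List.getElem_mem _
          have := hbd _ hjd
          rw [List.getD_eq_getElem _ _ hkn] at hlt
          omega
        rw [hfilt, hasc]
        simp only [pvBStep2, hx, hle, if_pos]
        have := ih (by omega) e
        rw [hmin, min_eq_left hle] at this
        simpa using this
      · push Not at hle
        have hasc : ascB v k = true := by
          simp only [ascB, decide_eq_true_eq]
          obtain ⟨p, hp, hpv⟩ := List.mem_iff_getElem.mp hmem
          refine ⟨k + 1 + p, by simp at hp; omega, by omega, ?_⟩
          rw [List.getD_eq_getElem _ _ (by simp at hp; omega),
              List.getD_eq_getElem _ _ hkn]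
          have : v[k + 1 + p]'(by simp at hp; omega) = (v.drop (k+1))[p] := by
            rw [List.getElem_drop]
          rw [this, hpv]
          exact hle
        rw [hfilt, hasc]
        simp only [pvBStep2, hx, not_le.mpr hle]
        have := ih (by omega) (k : Int)
        rw [hmin, min_eq_right (le_of_lt hle)] at this
        simp only [if_true, if_false]
        rw [this]
        cases hh : ((List.range k).filter (ascB v)).head? with
        | none =>
          have : (List.range k).filter (ascB v) = [] := List.head?_eq_none_iff.mp hh
          simp [this]
        | some a =>
          have hne : (List.range k).filter (ascB v) ≠ [] := by
            intro hcon; rw [hcon] at hh; simp at hh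
          rw [List.head?_append_of_ne_nil _ hne]
          simp [hh]

lemma agree_right (v : List Int) (i : Nat)
    (h : ∀ k, i ≤ k → k < v.length → descB v k = false) :
    ∀ k, i ≤ k → k < v.length →
      v.getD k 0 = (PySem.List.sorted v (fun x => x) false).getD k 0 := by
  intro k hik hkn
  have hin : i ≤ v.length := by omega
  have hnd : ∀ q j, i ≤ q → q < v.length → j < q → v.getD j 0 ≤ v.getD q 0 := by
    intro q j hq1 hq2 hj
    have := h q hq1 hq2
    simp only [descB, decide_eq_false_iff_not] at this
    push Not at this
    exact this j hj
  have htake : (PySem.List.sorted (v.take i) (fun x => x) false).Perm (v.take i) :=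
    PySem.List.sorted_perm _ _ _
  have hys : PySem.List.sorted v (fun x => x) false =
      PySem.List.sorted (v.take i) (fun x => x) false ++ v.drop i := by
    apply PySem.List.sorted_id_eq_of_perm_of_pairwise
    · exact (htake.append_right _).trans (by rw [List.take_append_drop])
    · rw [List.pairwise_append]
      refine ⟨by simpa using PySem.List.sorted_pairwise (v.take i) (fun x => x), ?_, ?_⟩
      · rw [List.pairwise_iff_getElem]
        intro p q hp hq hpq
        have hq' : i + q < v.length := by simp at hq; omega
        have hp' : i + p < v.length := by omega
        rw [List.getElem_drop, List.getElem_drop]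
        have := hnd (i + q) (i + p) (by omega) hq' (by omega)
        rwa [List.getD_eq_getElem _ _ hp', List.getD_eq_getElem _ _ hq'] at this
      · intro a ha b hb
        have ha' : a ∈ v.take i := (PySem.List.mem_sorted _ _ _ _).mp ha
        obtain ⟨j, hj, hja⟩ := List.mem_iff_getElem.mp ha'
        obtain ⟨q, hq, hqb⟩ := List.mem_iff_getElem.mp hb
        have hjlen : j < i := by simp at hj; omega
        have hjv : j < v.length := by simp at hj; omega
        have hq' : i + q < v.length := by simp at hq; omega
        have := hnd (i + q) j (by omega) hq' (by omega)
        rw [List.getElem_take] at hja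
        rw [List.getElem_drop] at hqb
        rw [List.getD_eq_getElem _ _ hjv, List.getD_eq_getElem _ _ hq', hja, hqb] at this
        exact this
  rw [hys]
  have hlt : (PySem.List.sorted (v.take i) (fun x => x) false).length = i := by
    rw [PySem.List.length_sorted, List.length_take]
    omega
  rw [List.getD_append_right _ _ _ _ (by omega : (PySem.List.sorted (v.take i) (fun x => x) false).length ≤ k), hlt]
  have hki : k - i < (v.drop i).length := by simp; omega
  rw [List.getD_eq_getElem _ _ hki, List.getElem_drop, List.getD_eq_getElem _ _ hkn]
  congr 1
  omega

lemma mis_to_desc (v : List Int) (i : Nat) (hi : i < v.length)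
    (hm : misB v (PySem.List.sorted v (fun x => x) false) i = true) :
    ∃ k, i ≤ k ∧ k < v.length ∧ descB v k = true := by
  by_contra hcon
  push Not at hcon
  have h : ∀ k, i ≤ k → k < v.length → descB v k = false := by
    intro k h1 h2
    have := hcon k h1 h2
    exact Bool.not_eq_true _ ▸ (by simpa using this)
  have := agree_right v i h i (le_refl _) hi
  simp only [misB, decide_eq_true_eq] at hm
  exact hm this

lemma desc_to_mis (v : List Int) (i : Nat) (hi : i < v.length) (hd : descB v i = true) :
    ∃ k, i ≤ k ∧ k < v.length ∧ misB v (PySem.List.sorted v (fun x => x) false) k = true := by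
  by_contra hcon
  push Not at hcon
  set S := PySem.List.sorted v (fun x => x) false with hSdef
  have hSlen : S.length = v.length := PySem.List.length_sorted _ _ _
  have hagree : ∀ k, i ≤ k → k < v.length → v.getD k 0 = S.getD k 0 := by
    intro k h1 h2
    simpa [misB] using hcon k h1 h2
  have hdrop : S.drop i = v.drop i := by
    apply List.ext_getElem (by simp [hSlen])
    intro p hp1 hp2
    rw [List.getElem_drop, List.getElem_drop]
    have hip : i + p < v.length := by simp at hp2; omega
    have := hagree (i + p) (by omega) hip
    rw [List.getD_eq_getElem _ _ hip, List.getD_eq_getElem _ _ (by omega : i + p < S.length)] at this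
    exact this.symm
  have hperm : S.Perm v := PySem.List.sorted_perm _ _ _
  have hperm2 : (S.take i ++ S.drop i).Perm (v.take i ++ v.drop i) := by
    rw [List.take_append_drop, List.take_append_drop]; exact hperm
  rw [hdrop] at hperm2
  have htperm : (S.take i).Perm (v.take i) := (List.perm_append_right_iff _).mp hperm2
  simp only [descB, decide_eq_true_eq] at hd
  obtain ⟨j, hj, hlt⟩ := hd
  have hjv : j < v.length := by omega
  have hmem : v.getD j 0 ∈ v.take i := by
    rw [List.getD_eq_getElem _ _ hjv]
    rw [List.mem_take_iff_getElem]
    exact ⟨j, by omega, rfl⟩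
  have hmemS : v.getD j 0 ∈ S.take i := htperm.mem_iff.mpr hmem
  obtain ⟨p, hp, hpv⟩ := List.mem_iff_getElem.mp hmemS
  have hpi : p < i := by simp at hp; omega
  have hpS : p < S.length := by omega
  rw [List.getElem_take] at hpv
  have hsorted : S.Pairwise (· ≤ ·) := by
    simpa using PySem.List.sorted_pairwise v (fun x => x)
  have hle : S[p]'hpS ≤ S[i]'(by omega) := by
    rcases lt_or_eq_of_le (le_of_lt hpi) with h' | h'
    · exact List.pairwise_iff_getElem.mp hsorted p i hpS (by omega) hpi
    · subst h'; exact le_refl _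
  have hii := hagree i (le_refl _) hi
  rw [List.getD_eq_getElem _ _ hi, List.getD_eq_getElem _ _ (by omega : i < S.length)] at hii
  rw [← hpv] at hlt
  rw [List.getD_eq_getElem _ _ hi] at hlt
  omega

lemma agree_left (v : List Int) (i : Nat)
    (h : ∀ k, k ≤ i → ascB v k = false) :
    ∀ k, k ≤ i → k < v.length →
      v.getD k 0 = (PySem.List.sorted v (fun x => x) false).getD k 0 := by
  intro k hik hkn
  have hna : ∀ q j, q ≤ i → j < v.length → q < j → v.getD q 0 ≤ v.getD j 0 := by
    intro q j hq hj hqj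
    have := h q hq
    simp only [ascB, decide_eq_false_iff_not] at this
    push Not at this
    exact this j hj hqj
  have hdrop : (PySem.List.sorted (v.drop (i+1)) (fun x => x) false).Perm (v.drop (i+1)) :=
    PySem.List.sorted_perm _ _ _
  have hys : PySem.List.sorted v (fun x => x) false =
      v.take (i+1) ++ PySem.List.sorted (v.drop (i+1)) (fun x => x) false := by
    apply PySem.List.sorted_id_eq_of_perm_of_pairwise
    · exact (hdrop.append_left _).trans (by rw [List.take_append_drop])
    · rw [List.pairwise_append]
      refine ⟨?_, by simpa using PySem.List.sorted_pairwise (v.drop (i+1)) (fun x => x), ?_⟩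
      · rw [List.pairwise_iff_getElem]
        intro p q hp hq hpq
        have hq' : q < v.length := by simp at hq; omega
        have hqi : q ≤ i := by simp at hq; omega
        have hp' : p < v.length := by omega
        rw [List.getElem_take, List.getElem_take]
        have := hna p q (by omega) hq' hpq
        rwa [List.getD_eq_getElem _ _ hp', List.getD_eq_getElem _ _ hq'] at this
      · intro a ha b hb
        have hb' : b ∈ v.drop (i+1) := (PySem.List.mem_sorted _ _ _ _).mp hb
        obtain ⟨p, hp, hpa⟩ := List.mem_iff_getElem.mp ha
        obtain ⟨q, hq, hqb⟩ := List.mem_iff_getElem.mp hb'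
        have hpi : p ≤ i := by simp at hp; omega
        have hpv : p < v.length := by simp at hp; omega
        have hq' : i + 1 + q < v.length := by simp at hq; omega
        have := hna p (i + 1 + q) hpi hq' (by omega)
        rw [List.getElem_take] at hpa
        rw [List.getElem_drop] at hqb
        rw [List.getD_eq_getElem _ _ hpv, List.getD_eq_getElem _ _ hq', hpa, hqb] at this
        exact this
  rw [hys]
  have hklt : k < (v.take (i+1)).length := by simp; omega
  rw [List.getD_append _ _ _ _ hklt]
  rw [List.getD_eq_getElem _ _ hklt, List.getElem_take, List.getD_eq_getElem _ _ hkn]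

lemma mis_to_asc (v : List Int) (i : Nat) (hi : i < v.length)
    (hm : misB v (PySem.List.sorted v (fun x => x) false) i = true) :
    ∃ k, k ≤ i ∧ ascB v k = true := by
  by_contra hcon
  push Not at hcon
  have h : ∀ k, k ≤ i → ascB v k = false := by
    intro k h1
    simpa using hcon k h1
  have := agree_left v i h i (le_refl _) hi
  simp only [misB, decide_eq_true_eq] at hm
  exact hm this

lemma asc_to_mis (v : List Int) (i : Nat) (hi : i < v.length) (ha : ascB v i = true) :
    ∃ k, k ≤ i ∧ misB v (PySem.List.sorted v (fun x => x) false) k = true := by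
  by_contra hcon
  push Not at hcon
  set S := PySem.List.sorted v (fun x => x) false with hSdef
  have hSlen : S.length = v.length := PySem.List.length_sorted _ _ _
  have hagree : ∀ k, k ≤ i → v.getD k 0 = S.getD k 0 := by
    intro k h1
    simpa [misB] using hcon k h1
  have htake : S.take (i+1) = v.take (i+1) := by
    apply List.ext_getElem (by simp [hSlen])
    intro p hp1 hp2
    have hpv : p < v.length := by simp at hp2; omega
    have hpi : p ≤ i := by simp at hp2; omega
    rw [List.getElem_take, List.getElem_take]
    have := hagree p hpi
    rw [List.getD_eq_getElem _ _ hpv, List.getD_eq_getElem _ _ (by omega : p < S.length)] at this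
    exact this.symm
  have hperm : S.Perm v := PySem.List.sorted_perm _ _ _
  have hperm2 : (v.take (i+1) ++ S.drop (i+1)).Perm (v.take (i+1) ++ v.drop (i+1)) := by
    have h1 : v.take (i+1) ++ S.drop (i+1) = S := by rw [← htake, List.take_append_drop]
    have h2 : v.take (i+1) ++ v.drop (i+1) = v := List.take_append_drop _ _
    rw [h1, h2]; exact hperm
  have hdperm : (S.drop (i+1)).Perm (v.drop (i+1)) := (List.perm_append_left_iff _).mp hperm2
  simp only [ascB, decide_eq_true_eq] at ha
  obtain ⟨j, hj, hij, hlt⟩ := ha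
  have hmem : v.getD j 0 ∈ v.drop (i+1) := by
    rw [List.getD_eq_getElem _ _ hj]
    have : v[j] = (v.drop (i+1))[j - (i+1)]'(by simp; omega) := by
      rw [List.getElem_drop]; congr 1; omega
    rw [this]; exact List.getElem_mem _
  have hmemS : v.getD j 0 ∈ S.drop (i+1) := hdperm.mem_iff.mpr hmem
  obtain ⟨p, hp, hpv⟩ := List.mem_iff_getElem.mp hmemS
  have hpS : i + 1 + p < S.length := by simp at hp; omega
  rw [List.getElem_drop] at hpv
  have hsorted : S.Pairwise (· ≤ ·) := by
    simpa using PySem.List.sorted_pairwise v (fun x => x)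
  have hle : S[i]'(by omega) ≤ S[i+1+p]'hpS :=
    List.pairwise_iff_getElem.mp hsorted i (i+1+p) (by omega) hpS (by omega)
  have hii := hagree i (le_refl _)
  rw [List.getD_eq_getElem _ _ hi, List.getD_eq_getElem _ _ (by omega : i < S.length)] at hii
  rw [← hpv] at hlt
  rw [List.getD_eq_getElem _ _ hi] at hlt
  omega

-- ---- the two ports agree
lemma AB_eq (v : List Int) : findUnsortedSubarray v = findUnsortedSubarray_alt v := by
  unfold findUnsortedSubarray findUnsortedSubarray_alt
  dsimp only
  set S := PySem.List.sorted v (fun x => x) false with hS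
  have hlen : S.length = v.length := PySem.List.length_sorted _ _ _
  rw [A_LP v S hlen, A_RP v S hlen, B_fold1 v]
  have hnone : (v.drop v.length).min? = none := by simp
  cases hM : (Ml v S).getLast? with
  | none =>
    -- no mismatch: A returns 0 - 0; B's forward pass finds no descent
    have hMnil : Ml v S = [] := List.getLast?_eq_none_iff.mp hM
    have hDnil : Dl v = [] := by
      rw [List.eq_nil_iff_forall_not_mem]
      intro d hd
      obtain ⟨hdn, hdesc⟩ := mem_Dl.mp hd
      obtain ⟨k, _, hkn, hkmis⟩ := desc_to_mis v d hdn hdesc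
      have : k ∈ Ml v S := mem_Ml.mpr ⟨hkn, hkmis⟩
      rw [hMnil] at this
      exact absurd this (List.not_mem_nil)
    have hMh : (Ml v S).head? = none := by rw [hMnil]; rfl
    rw [hMh]
    have hDh : (Dl v).getLast? = none := by rw [hDnil]; rfl
    rw [hDh]
    simp
  | some b =>
    obtain ⟨hbM, hbmax⟩ := getLast?_is_max (filterRange_pairwise _ _) hM
    obtain ⟨hbn, hbmis⟩ := mem_Ml.mp hbM
    obtain ⟨a, hMh⟩ : ∃ a, (Ml v S).head? = some a := by
      cases hMh : (Ml v S).head? with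
      | none =>
        have hb' : b ∈ Ml v S := mem_Ml.mpr ⟨hbn, hbmis⟩
        rw [List.head?_eq_none_iff.mp hMh] at hb'
        exact absurd hb' (List.not_mem_nil)
      | some a => exact ⟨a, rfl⟩
    obtain ⟨haM, hamin⟩ := head?_is_min (filterRange_pairwise _ _) hMh
    obtain ⟨han, hamis⟩ := mem_Ml.mp haM
    rw [hMh]
    -- B's forward pass: last descent index equals b
    obtain ⟨k₁, hbk₁, hk₁n, hk₁d⟩ := mis_to_desc v b hbn hbmis
    have hk₁D : k₁ ∈ Dl v := mem_Dl.mpr ⟨hk₁n, hk₁d⟩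
    obtain ⟨d, hD⟩ : ∃ d, (Dl v).getLast? = some d := by
      cases hD : (Dl v).getLast? with
      | none =>
        rw [List.getLast?_eq_none_iff.mp hD] at hk₁D
        exact absurd hk₁D (List.not_mem_nil)
      | some d => exact ⟨d, rfl⟩
    obtain ⟨hdD, hdmax⟩ := getLast?_is_max (filterRange_pairwise _ _) hD
    obtain ⟨hdn, hddesc⟩ := mem_Dl.mp hdD
    obtain ⟨k₂, hdk₂, hk₂n, hk₂m⟩ := desc_to_mis v d hdn hddesc
    have hdb : d = b := by
      have h1 : b ≤ d := le_trans hbk₁ (hdmax _ hk₁D)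
      have h2 : k₂ ≤ b := hbmax _ (mem_Ml.mpr ⟨hk₂n, hk₂m⟩)
      omega
    rw [hD]
    -- B's backward pass: first ascent index equals a
    obtain ⟨k₃, hk₃a, hk₃asc⟩ := mis_to_asc v a han hamis
    have hk₃A : k₃ ∈ Al v := mem_Al.mpr ⟨by omega, hk₃asc⟩
    obtain ⟨a', hA⟩ : ∃ a', (Al v).head? = some a' := by
      cases hA : (Al v).head? with
      | none =>
        rw [List.head?_eq_none_iff.mp hA] at hk₃A
        exact absurd hk₃A (List.not_mem_nil)
      | some a' => exact ⟨a', rfl⟩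
    obtain ⟨ha'A, ha'min⟩ := head?_is_min (filterRange_pairwise _ _) hA
    obtain ⟨ha'n, ha'asc⟩ := mem_Al.mp ha'A
    obtain ⟨k₄, hk₄a', hk₄m⟩ := asc_to_mis v a' ha'n ha'asc
    have ha'a : a' = a := by
      have h1 : a' ≤ a := le_trans (ha'min _ hk₃A) hk₃a
      have h2 : a ≤ k₄ := hamin _ (mem_Ml.mpr ⟨by omega, hk₄m⟩)
      omega
    have hdne : ((d : Int)) ≠ -1 := by
      have : (0 : Int) ≤ (d : Int) := Int.natCast_nonneg d
      omega
    rw [if_neg hdne]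
    have h2 := B_fold2 v v.length (le_refl _) (d : Int)
    rw [hnone] at h2
    rw [h2, ← Al, hA, hdb, ha'a]
    ring

-- ===== VERDICT (by name: the statement is the Claim_ definition above) =====
theorem findUnsortedSubarray_spec : Claim_equal_findUnsortedSubarray := by
  unfold Claim_equal_findUnsortedSubarray Spec_findUnsortedSubarray
  intro v _
  exact AB_eq v
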